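-- pv_equiv track=rewrite | github.com/oriel-github/Of-Stats-and-Sports | cartesian_product.py | get_combinations_of
-- ===== SOURCE A (Python) =====
-- def get_combinations_of(set_list):  # Extracting only pairs regardless of order
--     combination_list, i = [], 0  # Defining 1st pair element tracker variable
--     while i < len(set_list):
--         j = i + 1  # Defining 2nd pair element tracker that always tracks on elements i hasn't been paired with earlier
--         while j < len(set_list):  # Iterates over all potential pairs with that i
--             combination_list.append((set_list[i], set_list[j]))
--             j += 1
--         i += 1
--     return combination_list
-- ===== SOURCE B (Python) =====
-- def get_combinations_of(set_list):  # Peel the head off a shrinking list, pairing it with the remainder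
--     combination_list = []
--     rest = set_list
--     while len(rest) > 1:
--         head, rest = rest[0], rest[1:]
--         combination_list.extend((head, x) for x in rest)
--     return combination_list
-- ===== Notes on version B (the rewrite author's own statement) =====
-- stated objective: alternative
-- what changed: Replaced the two nested index-driven while loops with a single loop over a shrinking list: peel off the head, pair it with every remaining element, repeat on the remainder.
import Mathlib
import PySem

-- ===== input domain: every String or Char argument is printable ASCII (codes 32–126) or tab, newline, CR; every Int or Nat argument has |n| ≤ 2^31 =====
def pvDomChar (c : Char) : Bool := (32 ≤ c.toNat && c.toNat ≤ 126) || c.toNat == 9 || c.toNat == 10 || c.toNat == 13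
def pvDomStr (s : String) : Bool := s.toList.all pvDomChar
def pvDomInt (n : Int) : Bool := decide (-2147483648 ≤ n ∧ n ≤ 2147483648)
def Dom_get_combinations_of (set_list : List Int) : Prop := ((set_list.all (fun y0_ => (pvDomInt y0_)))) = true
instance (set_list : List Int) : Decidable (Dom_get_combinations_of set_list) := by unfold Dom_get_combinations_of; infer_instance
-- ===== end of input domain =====

-- ===== PORT A =====
-- B changes only the decomposition (head/tail recursion instead of nested index loops); same values, same order, same cost.
-- inner while loop of A: appends (vi, set_list[j]) for j in [j, len); indices are always in range, so getD 0 is exact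
def pvGoJ (xs : List Int) (vi : Int) (j : Nat) (acc : List (Int × Int)) : List (Int × Int) :=
  if h : j < xs.length then pvGoJ xs vi (j+1) (acc ++ [(vi, xs.getD j 0)]) else acc
termination_by xs.length - j
-- outer while loop of A
def pvGoI (xs : List Int) (i : Nat) (acc : List (Int × Int)) : List (Int × Int) :=
  if h : i < xs.length then pvGoI xs (i+1) (pvGoJ xs (xs.getD i 0) (i+1) acc) else acc
termination_by xs.length - i
def get_combinations_of (set_list : List Int) : List (Int × Int) :=
  pvGoI set_list 0 []

-- ===== PORT B =====
-- the while loop of B: while len(rest) > 1, peel head, extend with (head, x) for x in rest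
def pvGoB : List Int → List (Int × Int) → List (Int × Int)
  | h :: x :: t, out => pvGoB (x :: t) (out ++ (x :: t).map (fun y => (h, y)))
  | _, out => out
def get_combinations_of_alt (set_list : List Int) : List (Int × Int) :=
  pvGoB set_list []

-- ===== PRECONDITION & SPEC =====
def Spec_get_combinations_of (set_list : List Int) (out : List (Int × Int)) : Prop := out = get_combinations_of_alt set_list
instance (set_list : List Int) (out : List (Int × Int)) : Decidable (Spec_get_combinations_of set_list out) := by unfold Spec_get_combinations_of; infer_instance

-- ===== CLAIM (what is proved, stated in full; the proofs are below) =====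
def Claim_equal_get_combinations_of : Prop := ∀ (set_list : List Int), Dom_get_combinations_of set_list → Spec_get_combinations_of set_list (get_combinations_of set_list)

-- ===== LEMMAS AND PROOFS =====

-- ===== VERDICT (by name: the statement is the Claim_ definition above) =====
lemma pvGoJ_spec (xs : List Int) (vi : Int) (j : Nat) (acc : List (Int × Int)) :
    pvGoJ xs vi j acc = acc ++ (xs.drop j).map (fun x => (vi, x)) := by
  induction hn : xs.length - j using Nat.strong_induction_on generalizing j acc with
  | _ n ih =>
    rw [pvGoJ]
    split
    · next h =>
      rw [ih (xs.length - (j+1)) (by omega) (j+1) _ rfl, xs.getD_eq_getElem 0 h]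
      conv_rhs => rw [← List.getElem_cons_drop h]
      simp only [List.map_cons, List.append_assoc, List.singleton_append]
    · next h =>
      rw [List.drop_eq_nil_of_le (by omega)]
      simp

-- head/tail characterisation of the pair list, used only by the proofs
def pvPairs : List Int → List (Int × Int)
  | [] => []
  | h :: t => (t.map (fun x => (h, x))) ++ pvPairs t

lemma pvGoB_spec (rest : List Int) (out : List (Int × Int)) :
    pvGoB rest out = out ++ pvPairs rest := by
  induction rest generalizing out with
  | nil => simp [pvGoB, pvPairs]
  | cons h t ih =>
    cases t with
    | nil => simp [pvGoB, pvPairs]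
    | cons x t' => rw [pvGoB, ih]; simp [pvPairs]

lemma pvGoI_spec (xs : List Int) (i : Nat) (acc : List (Int × Int)) :
    pvGoI xs i acc = acc ++ pvPairs (xs.drop i) := by
  induction hn : xs.length - i using Nat.strong_induction_on generalizing i acc with
  | _ n ih =>
    rw [pvGoI]
    split
    · next h =>
      rw [ih (xs.length - (i+1)) (by omega) (i+1) _ rfl, pvGoJ_spec, xs.getD_eq_getElem 0 h]
      conv_rhs => rw [← List.getElem_cons_drop h]
      simp only [pvPairs, List.append_assoc]
    · next h =>
      rw [List.drop_eq_nil_of_le (by omega)]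
      simp [pvPairs]

-- ===== VERDICT =====
theorem get_combinations_of_spec : Claim_equal_get_combinations_of := by
  intro xs _
  unfold Spec_get_combinations_of get_combinations_of get_combinations_of_alt
  rw [pvGoI_spec, pvGoB_spec]
  simp
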